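-- pv_equiv track=rewrite | github.com/pythonkodlarimm-cpu/fonksiyon_degistiricii | app/core/dil_ekle/dil_gelistirici.py | _json_sirali_yapi
-- ===== SOURCE A (Python) =====
-- from typing import Any
--
-- META_KEY_PREFIX = "_meta_"
--
-- def _json_sirali_yapi(veri: dict[str, Any]) -> dict[str, Any]:
--     """
--     JSON yazımı için meta anahtarları üstte tutar, diğer anahtarları mevcut sırayla bırakır.
--     Python 3.7+ dict sırası korunduğu için ek sıralama uygulanmaz.
--     """
--     meta = {}
--     normal = {}
--
--     for anahtar, deger in veri.items():
--         if str(anahtar).startswith(META_KEY_PREFIX):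
--             meta[anahtar] = deger
--         else:
--             normal[anahtar] = deger
--
--     sonuc = {}
--     sonuc.update(meta)
--     sonuc.update(normal)
--     return sonuc
-- ===== SOURCE B (Python) =====
-- META_KEY_PREFIX = "_meta_"
--
-- def _json_sirali_yapi(veri):
--     return dict(sorted(veri.items(), key=lambda kv: not str(kv[0]).startswith(META_KEY_PREFIX)))
-- ===== Notes on version B (the rewrite author's own statement) =====
-- stated objective: idiomatic
-- what changed: Replaces the explicit two-bucket partition (two dicts built in a loop, then merged with update) by a single stable sort on a boolean key (not key.startswith(META_KEY_PREFIX)), whose stability reproduces the meta-first order in one expression.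
import Mathlib
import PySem

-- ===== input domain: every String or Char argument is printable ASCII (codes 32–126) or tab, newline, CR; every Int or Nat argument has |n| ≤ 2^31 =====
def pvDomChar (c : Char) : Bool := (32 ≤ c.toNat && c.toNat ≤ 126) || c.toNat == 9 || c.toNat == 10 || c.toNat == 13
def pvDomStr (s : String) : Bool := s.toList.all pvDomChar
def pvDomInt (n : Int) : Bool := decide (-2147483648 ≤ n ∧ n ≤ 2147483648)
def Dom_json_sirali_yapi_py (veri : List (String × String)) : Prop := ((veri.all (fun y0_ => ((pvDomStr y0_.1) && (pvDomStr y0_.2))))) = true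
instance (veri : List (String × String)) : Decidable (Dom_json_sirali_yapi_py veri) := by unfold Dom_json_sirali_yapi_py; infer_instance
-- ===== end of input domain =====

-- B replaces A's two-bucket partition+merge by one stable sort on a boolean key (idiomatic, same result).

-- ===== PORT A =====
-- meta = {}; normal = {}; for anahtar, deger in veri.items(): ...; sonuc = {}; sonuc.update(meta); sonuc.update(normal)
def json_sirali_yapi_py (veri : List (String × String)) : List (String × String) :=
  let md : PySem.Dict String String × PySem.Dict String String :=
    veri.foldl (fun acc p =>
      if PySem.Str.startswith p.1 "_meta_" then (acc.1.insert p.1 p.2, acc.2)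
      else (acc.1, acc.2.insert p.1 p.2))
      (PySem.Dict.empty, PySem.Dict.empty)
  let sonuc := (PySem.Dict.empty.update md.1.items).update md.2.items
  sonuc.items

-- ===== PORT B =====
-- dict(sorted(veri.items(), key=lambda kv: not str(kv[0]).startswith(META_KEY_PREFIX)))
def json_sirali_yapi_py_alt (veri : List (String × String)) : List (String × String) :=
  PySem.List.sorted veri (fun kv => !PySem.Str.startswith kv.1 "_meta_")

-- ===== PRECONDITION & SPEC =====
-- Pre_ excludes lists with duplicate keys: they do not represent any Python dict (the input type is
-- dict[str, str], whose keys are necessarily distinct), so A is never called on them.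
def Pre_json_sirali_yapi_py (veri : List (String × String)) : Prop :=
  (veri.map Prod.fst).Nodup
instance (veri : List (String × String)) : Decidable (Pre_json_sirali_yapi_py veri) := by unfold Pre_json_sirali_yapi_py; infer_instance
def pvWitness_json_sirali_yapi_py : (List (String × String)) := [("a", "1"), ("_meta_k", "2"), ("b", "3")]

def Spec_json_sirali_yapi_py (veri : List (String × String)) (out : List (String × String)) : Prop := out = json_sirali_yapi_py_alt veri
instance (veri : List (String × String)) (out : List (String × String)) : Decidable (Spec_json_sirali_yapi_py veri out) := by unfold Spec_json_sirali_yapi_py; infer_instance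

-- ===== CLAIM (what is proved, stated in full; the proofs are below) =====
def Claim_equal_json_sirali_yapi_py : Prop := ∀ (veri : List (String × String)), Dom_json_sirali_yapi_py veri → Pre_json_sirali_yapi_py veri → Spec_json_sirali_yapi_py veri (json_sirali_yapi_py veri)

-- ===== LEMMAS AND PROOFS =====

-- The meta-key predicate, shared by both proofs.
def pvMeta (p : String × String) : Bool := PySem.Str.startswith p.1 "_meta_"

-- A's partition loop appends each pair to the matching dict's item list (keys fresh and distinct).
theorem pvA_loop (l : List (String × String)) (d1 d2 : PySem.Dict String String)
    (hnd : (l.map Prod.fst).Nodup)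
    (h1 : ∀ p ∈ l, d1.contains p.1 = false) (h2 : ∀ p ∈ l, d2.contains p.1 = false) :
    (l.foldl (fun acc p =>
        if PySem.Str.startswith p.1 "_meta_" then (acc.1.insert p.1 p.2, acc.2)
        else (acc.1, acc.2.insert p.1 p.2)) (d1, d2)).1.items
      = d1.items ++ l.filter pvMeta
    ∧ (l.foldl (fun acc p =>
        if PySem.Str.startswith p.1 "_meta_" then (acc.1.insert p.1 p.2, acc.2)
        else (acc.1, acc.2.insert p.1 p.2)) (d1, d2)).2.items
      = d2.items ++ l.filter (fun p => !pvMeta p) := by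
  induction l generalizing d1 d2 with
  | nil => simp
  | cons p t ih =>
    rw [List.map_cons, List.nodup_cons] at hnd
    have hp1 : d1.contains p.1 = false := h1 p (by simp)
    have hp2 : d2.contains p.1 = false := h2 p (by simp)
    have hkey : ∀ q ∈ t, q.1 ≠ p.1 := by
      intro q hq h
      exact hnd.1 (by rw [← h]; exact List.mem_map_of_mem hq)
    simp only [List.foldl_cons]
    by_cases hm : PySem.Str.startswith p.1 "_meta_" = true
    · have h1' : ∀ q ∈ t, (d1.insert p.1 p.2).contains q.1 = false := by
        intro q hq
        rw [PySem.Dict.contains_insert]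
        simp [hkey q hq, h1 q (List.mem_cons_of_mem _ hq)]
      obtain ⟨ih1, ih2⟩ := ih (d1.insert p.1 p.2) d2 hnd.2 h1' (fun q hq => h2 q (List.mem_cons_of_mem _ hq))
      have hm' : pvMeta p = true := hm
      rw [if_pos hm]
      constructor
      · rw [ih1, PySem.Dict.items_insert_of_not_contains d1 p.2 hp1]
        simp [hm']
      · rw [ih2]
        simp [hm']
    · have h2' : ∀ q ∈ t, (d2.insert p.1 p.2).contains q.1 = false := by
        intro q hq
        rw [PySem.Dict.contains_insert]
        simp [hkey q hq, h2 q (List.mem_cons_of_mem _ hq)]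
      obtain ⟨ih1, ih2⟩ := ih d1 (d2.insert p.1 p.2) hnd.2 (fun q hq => h1 q (List.mem_cons_of_mem _ hq)) h2'
      have hm' : pvMeta p = false := by simpa [pvMeta] using hm
      rw [if_neg hm]
      constructor
      · rw [ih1]
        simp [hm']
      · rw [ih2, PySem.Dict.items_insert_of_not_contains d2 p.2 hp2]
        simp [hm']

-- Stable insertion of a meta pair into a (meta-block ++ normal-block) list lands at the end of the meta block.
theorem pvIns_meta (x : String × String) (A B : List (String × String))
    (hA : ∀ a ∈ A, pvMeta a = true) (hB : ∀ b ∈ B, pvMeta b = false)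
    (hx : pvMeta x = true) :
    PySem.List.insertBy (fun a b => decide ((!pvMeta a) < (!pvMeta b))) x (A ++ B)
      = A ++ x :: B := by
  induction A with
  | nil =>
    cases B with
    | nil => simp [PySem.List.insertBy]
    | cons b B' =>
      have := hB b (by simp)
      simp [PySem.List.insertBy, hx, this]
  | cons a A' ih =>
    have ha := hA a (by simp)
    simp [PySem.List.insertBy, hx, ha, ih (fun q hq => hA q (by simp [hq]))]

-- Inserting a normal pair never goes before anything: it is appended at the very end.
theorem pvIns_normal (x : String × String) (ys : List (String × String))
    (hx : pvMeta x = false) :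
    PySem.List.insertBy (fun a b => decide ((!pvMeta a) < (!pvMeta b))) x ys
      = ys ++ [x] := by
  apply PySem.List.insertBy_of_forall_not_before
  intro y _
  simp [hx]

-- B's sort loop keeps the list partitioned: metas (in order) first, then normals (in order).
theorem pvB_loop (l A B : List (String × String))
    (hA : ∀ a ∈ A, pvMeta a = true) (hB : ∀ b ∈ B, pvMeta b = false) :
    l.foldl (fun acc x => PySem.List.insertBy (fun a b => decide ((!pvMeta a) < (!pvMeta b))) x acc) (A ++ B)
      = (A ++ l.filter pvMeta) ++ (B ++ l.filter (fun p => !pvMeta p)) := by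
  induction l generalizing A B with
  | nil => simp
  | cons x t ih =>
    by_cases hx : pvMeta x
    · have h1 : ∀ a ∈ A ++ [x], pvMeta a = true := by
        intro a ha; rcases List.mem_append.1 ha with h | h
        · exact hA a h
        · simp at h; simp [h, hx]
      have := ih (A ++ [x]) B h1 hB
      simp only [List.foldl_cons, pvIns_meta x A B hA hB hx]
      rw [show A ++ x :: B = (A ++ [x]) ++ B by simp]
      rw [this]
      simp [hx]
    · have h2 : ∀ b ∈ B ++ [x], pvMeta b = false := by
        intro b hb; rcases List.mem_append.1 hb with h | h
        · exact hB b h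
        · simp at h; simp [h, hx]
      have := ih A (B ++ [x]) hA h2
      simp only [List.foldl_cons, pvIns_normal x (A ++ B) (by simpa using hx)]
      rw [show (A ++ B) ++ [x] = A ++ (B ++ [x]) by simp]
      rw [this]
      simp [hx]

-- ===== VERDICT (by name: the statement is the Claim_ definition above) =====
theorem json_sirali_yapi_py_spec : Claim_equal_json_sirali_yapi_py := by
  intro veri _ hpre
  unfold Spec_json_sirali_yapi_py
  have e1 : json_sirali_yapi_py veri
      = ((PySem.Dict.empty.update
            ((veri.foldl (fun acc p =>
                if pvMeta p then (acc.1.insert p.1 p.2, acc.2)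
                else (acc.1, acc.2.insert p.1 p.2))
              (PySem.Dict.empty, PySem.Dict.empty)).1.items)).update
          ((veri.foldl (fun acc p =>
                if pvMeta p then (acc.1.insert p.1 p.2, acc.2)
                else (acc.1, acc.2.insert p.1 p.2))
              (PySem.Dict.empty, PySem.Dict.empty)).2.items)).items := rfl
  have e2 : json_sirali_yapi_py_alt veri = PySem.List.sorted veri (fun kv => !pvMeta kv) := rfl
  obtain ⟨hmi, hni⟩ := pvA_loop veri PySem.Dict.empty PySem.Dict.empty hpre
      (by intro p _; simp) (by intro p _; simp)
  have hmi' : (veri.foldl (fun acc p =>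
        if pvMeta p then (acc.1.insert p.1 p.2, acc.2)
        else (acc.1, acc.2.insert p.1 p.2))
      (PySem.Dict.empty, PySem.Dict.empty)).1.items = List.filter pvMeta veri :=
    hmi.trans (List.nil_append _)
  have hni' : (veri.foldl (fun acc p =>
        if pvMeta p then (acc.1.insert p.1 p.2, acc.2)
        else (acc.1, acc.2.insert p.1 p.2))
      (PySem.Dict.empty, PySem.Dict.empty)).2.items = List.filter (fun p => !pvMeta p) veri :=
    hni.trans (List.nil_append _)
  rw [e1, e2, hmi', hni']
  -- keys of the two buckets are nodup (sublists of veri's nodup key list)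
  have hmk : ((veri.filter pvMeta).map Prod.fst).Nodup :=
    hpre.sublist ((List.filter_sublist).map Prod.fst)
  have hnk : ((veri.filter (fun p => !pvMeta p)).map Prod.fst).Nodup :=
    hpre.sublist ((List.filter_sublist).map Prod.fst)
  -- first update: all keys fresh in the empty dict
  have hd1items : ((PySem.Dict.empty : PySem.Dict String String).update (veri.filter pvMeta)).items
      = veri.filter pvMeta := by
    simpa [PySem.Dict.update] using
      PySem.Dict.items_foldl_insert_fresh (veri.filter pvMeta) Prod.fst Prod.snd
        PySem.Dict.empty (by intro a _; simp) hmk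
  -- second update: normal keys do not occur among the meta keys
  have hfresh2 : ∀ a ∈ veri.filter (fun p => !pvMeta p),
      ((PySem.Dict.empty : PySem.Dict String String).update (veri.filter pvMeta)).contains a.1 = false := by
    intro a ha
    rw [PySem.Dict.contains_eq_decide_mem_keys]
    simp only [PySem.Dict.keys, hd1items, decide_eq_false_iff_not]
    intro hmem
    obtain ⟨q, hq, hq1⟩ := List.mem_map.1 hmem
    have heq : q = a :=
      List.inj_on_of_nodup_map hpre (List.mem_filter.1 hq).1 (List.mem_filter.1 ha).1 hq1
    have hqm : pvMeta q = true := (List.mem_filter.1 hq).2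
    have ham : pvMeta a = false := by simpa using (List.mem_filter.1 ha).2
    rw [heq, ham] at hqm
    exact absurd hqm (by simp)
  have h2 : (((PySem.Dict.empty : PySem.Dict String String).update (veri.filter pvMeta)).update
        (veri.filter (fun p => !pvMeta p))).items
      = ((PySem.Dict.empty : PySem.Dict String String).update (veri.filter pvMeta)).items
          ++ veri.filter (fun p => !pvMeta p) := by
    simpa [PySem.Dict.update] using
      PySem.Dict.items_foldl_insert_fresh (veri.filter (fun p => !pvMeta p)) Prod.fst Prod.snd
        ((PySem.Dict.empty : PySem.Dict String String).update (veri.filter pvMeta)) hfresh2 hnk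
  rw [h2, hd1items]
  -- B side: the stable sort on the boolean key is exactly the meta-first partition
  have hB := pvB_loop veri [] [] (by simp) (by simp)
  rw [PySem.List.sorted_eq_foldl_insertBy]
  simpa using hB.symm
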